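-- pv_equiv track=rewrite | github.com/HoangcoderIkci/CodePython | thuatToankhp.py | phep_nhan_2_list
-- ===== SOURCE A (Python) =====
-- def check_set_none(my_set):
--     lst = list(my_set)
--     for elem in lst:
--         if -elem in my_set:
--             return False
--     return True
--
-- def phep_nhan_2_list(list1, list2):
--     res = []
--     for elem1 in list1:
--         for elem2 in list2:
--             temp = elem1 | elem2
--             if check_set_none(temp) == False:
--                 continue
--             if temp not in res:
--                 res.append(elem1 | elem2)
--     return res
-- ===== SOURCE B (Python) =====
-- def phep_nhan_2_list(list1, list2):
--     # Factorised validity: e1|e2 is valid iff e1 and e2 are each self-consistent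
--     # and no negation of e1 lies in e2; prefilter both lists once, then only the
--     # surviving pairs get a union, deduped via a frozenset hash set.
--     ok1 = [(e, {-x for x in e}) for e in list1 if not ({-x for x in e} & e)]
--     ok2 = [e for e in list2 if not ({-x for x in e} & e)]
--     res = []
--     seen = set()
--     for e1, neg1 in ok1:
--         for e2 in ok2:
--             if neg1 & e2:
--                 continue
--             u = e1 | e2
--             key = frozenset(u)
--             if key not in seen:
--                 seen.add(key)
--                 res.append(u)
--     return res
-- ===== Notes on version B (the rewrite author's own statement) =====
-- stated objective: faster
-- what changed: Factorises the validity test: each list is prefiltered once for self-consistent sets (with their negation images precomputed), so only pairs passing a single disjointness check ever build a union, and dedup uses a frozenset hash set instead of A's linear 'temp not in res' scan.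
import Mathlib
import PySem

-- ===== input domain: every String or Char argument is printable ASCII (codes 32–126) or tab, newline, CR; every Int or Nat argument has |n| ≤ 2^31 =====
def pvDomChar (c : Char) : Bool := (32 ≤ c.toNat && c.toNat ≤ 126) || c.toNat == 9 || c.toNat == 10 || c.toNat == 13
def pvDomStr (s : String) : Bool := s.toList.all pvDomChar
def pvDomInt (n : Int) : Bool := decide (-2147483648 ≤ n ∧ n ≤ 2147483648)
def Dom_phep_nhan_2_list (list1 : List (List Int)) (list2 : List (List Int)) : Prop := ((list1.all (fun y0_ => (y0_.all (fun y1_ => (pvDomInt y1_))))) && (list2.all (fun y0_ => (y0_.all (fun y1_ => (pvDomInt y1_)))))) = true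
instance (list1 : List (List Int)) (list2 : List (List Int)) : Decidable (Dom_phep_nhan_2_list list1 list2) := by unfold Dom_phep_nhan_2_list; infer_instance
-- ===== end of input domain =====

-- ===== PORT A =====
-- B factorises the validity test (prefilter each list for self-consistency, then a pairwise disjointness check) and dedups via a frozenset hash set; measurably faster than A's per-pair union + scan.
-- check_set_none: 'for elem in lst: if -elem in my_set: return False / return True' (order-independent, so exact)
def pvCheckLoop : List Int → PySem.Set Int → Bool
  | [], _ => true
  | e :: rest, s => if PySem.Set.contains s (-e) then false else pvCheckLoop rest s

def pvCheckSetNone (s : PySem.Set Int) : Bool := pvCheckLoop s s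

def phep_nhan_2_list (list1 : List (List Int)) (list2 : List (List Int)) : List (List Int) :=
  list1.foldl (fun res e1 =>
    list2.foldl (fun res e2 =>
      let temp := PySem.Set.union e1 e2
      if pvCheckSetNone temp == false then res
      -- 'temp not in res': list membership of sets uses Python's ==, i.e. set equality
      else if res.any (fun r => PySem.Set.equal r temp) then res
      else res ++ [PySem.Set.union e1 e2]) res) []

-- ===== PORT B =====
-- {-x for x in e}
def pvNeg (e : List Int) : PySem.Set Int := PySem.Set.ofList (e.map (fun x => -x))
-- not ({-x for x in e} & e): a Python set is falsy iff empty
def pvSelfOk (e : PySem.Set Int) : Bool := (PySem.Set.inter (pvNeg e) e).isEmpty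

def phep_nhan_2_list_alt (list1 : List (List Int)) (list2 : List (List Int)) : List (List Int) :=
  let ok1 := (list1.filter pvSelfOk).map (fun e => (e, pvNeg e))
  let ok2 := list2.filter pvSelfOk
  -- frozenset keys compare by set equality, so 'seen' is the list of kept element-lists with Set.equal membership
  (ok1.foldl (fun (p : List (List Int) × List (List Int)) x =>
    ok2.foldl (fun p e2 =>
      if !(PySem.Set.inter x.2 e2).isEmpty then p
      else
        let u := PySem.Set.union x.1 e2
        if p.2.any (fun s => PySem.Set.equal s u) then p
        else (p.1 ++ [u], p.2 ++ [u])) p) (([], []) : List (List Int) × List (List Int))).1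

-- ===== PRECONDITION & SPEC =====
def Spec_phep_nhan_2_list (list1 : List (List Int)) (list2 : List (List Int)) (out : List (List Int)) : Prop := out = phep_nhan_2_list_alt list1 list2
instance (list1 : List (List Int)) (list2 : List (List Int)) (out : List (List Int)) : Decidable (Spec_phep_nhan_2_list list1 list2 out) := by unfold Spec_phep_nhan_2_list; infer_instance

-- ===== CLAIM (what is proved, stated in full; the proofs are below) =====
def Claim_equal_phep_nhan_2_list : Prop := ∀ (list1 : List (List Int)) (list2 : List (List Int)), Dom_phep_nhan_2_list list1 list2 → Spec_phep_nhan_2_list list1 list2 (phep_nhan_2_list list1 list2)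

-- ===== LEMMAS AND PROOFS =====

-- the common dedup step
def pvStep (res : List (List Int)) (u : List Int) : List (List Int) :=
  if res.any (fun r => PySem.Set.equal r u) then res else res ++ [u]

theorem pvCheckLoop_eq (l : List Int) (s : PySem.Set Int) :
    pvCheckLoop l s = !l.any (fun e => PySem.Set.contains s (-e)) := by
  induction l with
  | nil => rfl
  | cons e rest ih => simp only [pvCheckLoop, ih, List.any_cons]; split_ifs <;> simp_all

theorem pvSelfOk_iff (e : PySem.Set Int) :
    pvSelfOk e = true ↔ ∀ x ∈ e, -x ∉ e := by
  rw [pvSelfOk, pvNeg]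
  simp only [List.isEmpty_iff, List.eq_nil_iff_forall_not_mem, PySem.Set.mem_inter,
    PySem.Set.mem_ofList, List.mem_map, not_and, forall_exists_index, and_imp]
  constructor
  · intro h x hx hnx
    exact h (-x) x hx rfl hnx
  · intro h a b hb rfl hmem
    exact h b hb hmem

theorem pvInterNeg_iff (e1 e2 : PySem.Set Int) :
    (PySem.Set.inter (pvNeg e1) e2).isEmpty = true ↔ ∀ x ∈ e1, -x ∉ e2 := by
  rw [pvNeg]
  simp only [List.isEmpty_iff, List.eq_nil_iff_forall_not_mem, PySem.Set.mem_inter,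
    PySem.Set.mem_ofList, List.mem_map, not_and, forall_exists_index, and_imp]
  constructor
  · intro h x hx hnx
    exact h (-x) x hx rfl hnx
  · intro h a b hb rfl hmem
    exact h b hb hmem

-- factorised validity: the union is conflict-free iff each side is and no negation crosses
theorem pvCheck_factor (e1 e2 : PySem.Set Int) :
    pvCheckSetNone (PySem.Set.union e1 e2)
      = (pvSelfOk e1 && pvSelfOk e2 && (PySem.Set.inter (pvNeg e1) e2).isEmpty) := by
  rw [pvCheckSetNone, pvCheckLoop_eq, Bool.eq_iff_iff]
  simp only [Bool.not_eq_eq_eq_not, Bool.not_true, List.any_eq_false,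
    PySem.Set.contains_iff, Bool.and_eq_true, pvSelfOk_iff, pvInterNeg_iff]
  have hu : ∀ x : Int, x ∈ PySem.Set.union e1 e2 ↔ x ∈ e1 ∨ x ∈ e2 :=
    fun x => PySem.Set.mem_union e1 e2 x
  constructor
  · intro h
    refine ⟨⟨fun x hx hnx => ?_, fun x hx hnx => ?_⟩, fun x hx hnx => ?_⟩
    · exact h x ((hu x).mpr (Or.inl hx)) ((hu (-x)).mpr (Or.inl hnx))
    · exact h x ((hu x).mpr (Or.inr hx)) ((hu (-x)).mpr (Or.inr hnx))
    · exact h x ((hu x).mpr (Or.inl hx)) ((hu (-x)).mpr (Or.inr hnx))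
  · rintro ⟨⟨h1, h2⟩, h3⟩ x hx hnx
    rcases (hu x).mp hx with hx1 | hx2 <;> rcases (hu (-x)).mp hnx with hn1 | hn2
    · exact h1 x hx1 hn1
    · exact h3 x hx1 hn2
    · have := h3 (-x) hn1
      rw [neg_neg] at this
      exact this hx2
    · exact h2 x hx2 hn2

-- the (res, seen) pair keeps both components equal: the inner loop …
theorem pv_inner_fold (x : List Int × List Int) (zs : List (List Int)) (acc : List (List Int)) :
    zs.foldl (fun (p : List (List Int) × List (List Int)) e2 =>
        if !(PySem.Set.inter x.2 e2).isEmpty then p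
        else
          let u := PySem.Set.union x.1 e2
          if p.2.any (fun s => PySem.Set.equal s u) then p
          else (p.1 ++ [u], p.2 ++ [u])) (acc, acc)
    = (zs.foldl (fun r e2 =>
        if !(PySem.Set.inter x.2 e2).isEmpty then r
        else pvStep r (PySem.Set.union x.1 e2)) acc,
       zs.foldl (fun r e2 =>
        if !(PySem.Set.inter x.2 e2).isEmpty then r
        else pvStep r (PySem.Set.union x.1 e2)) acc) := by
  induction zs generalizing acc with
  | nil => rfl
  | cons e2 rest ih =>
    simp only [List.foldl_cons, pvStep]
    split_ifs <;> exact ih _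

-- … and hence the outer loop too
theorem pv_outer_fold (ok1 : List (List Int × List Int)) (ok2 : List (List Int)) (acc : List (List Int)) :
    (ok1.foldl (fun (p : List (List Int) × List (List Int)) x =>
      ok2.foldl (fun p e2 =>
        if !(PySem.Set.inter x.2 e2).isEmpty then p
        else
          let u := PySem.Set.union x.1 e2
          if p.2.any (fun s => PySem.Set.equal s u) then p
          else (p.1 ++ [u], p.2 ++ [u])) p) (acc, acc)).1
    = ok1.foldl (fun r x =>
        ok2.foldl (fun r e2 =>
          if !(PySem.Set.inter x.2 e2).isEmpty then r
          else pvStep r (PySem.Set.union x.1 e2)) r) acc := by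
  induction ok1 generalizing acc with
  | nil => rfl
  | cons x rest ih =>
    simp only [List.foldl_cons, pv_inner_fold]
    exact ih _

theorem pv_foldl_id {α β : Type} (zs : List β) (acc : α) (f : α → β → α)
    (h : ∀ a b, f a b = a) : zs.foldl f acc = acc := by
  induction zs with
  | nil => rfl
  | cons b rest ih => simp [List.foldl_cons, h, ih]

-- ===== VERDICT (by name: the statement is the Claim_ definition above) =====
theorem phep_nhan_2_list_spec : Claim_equal_phep_nhan_2_list := by
  intro list1 list2 _
  unfold Spec_phep_nhan_2_list
  simp only [phep_nhan_2_list, phep_nhan_2_list_alt]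
  rw [pv_outer_fold]
  simp only [List.foldl_map, List.foldl_filter]
  congr 1
  funext res e1
  cases h1 : pvSelfOk e1 with
  | false =>
    rw [if_neg (by simp)]
    exact pv_foldl_id _ _ _ (fun a b => by simp [pvCheck_factor, h1])
  | true =>
    rw [if_pos rfl]
    congr 1
    funext r e2
    cases h2 : pvSelfOk e2 <;>
      cases h3 : (PySem.Set.inter (pvNeg e1) e2).isEmpty <;>
        simp [pvCheck_factor, h1, h2, h3, pvStep]
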